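-- pv_equiv track=rewrite | github.com/cdump/evmole | benchmark/compare.py | flow_filter_reachable
-- ===== SOURCE A (Python) =====
-- from collections import defaultdict
--
-- def flow_filter_reachable(edges: list) -> list:
--     """
--     Finds all reachable edges (edges whose source node is reachable from node 0)
--     Example: [(0,1), (1,2), (3,4)] => [(0,1), (1,2)]
--     """
--     graph = defaultdict(list)
--     for src, dst in edges:
--         graph[src].append(dst)
--
--     reachable = set()
--     stack = [0]  # start from entry point (node 0)
--
--     while stack:
--         current = stack.pop()
--         if current not in reachable:
--             reachable.add(current)
--             stack.extend(graph[current])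
--
--     return sorted(e for e in edges if e[0] in reachable)
-- ===== SOURCE B (Python) =====
-- def flow_filter_reachable(edges: list) -> list:
--     """
--     Finds all reachable edges (edges whose source node is reachable from node 0)
--     Bellman-Ford-style relaxation: no adjacency map, no stack; just repeat a
--     full pass over the edge list len(edges) times (enough, since any shortest
--     path uses at most len(edges) edges).
--     """
--     reachable = {0}
--     for _ in range(len(edges)):
--         for src, dst in edges:
--             if src in reachable:
--                 reachable.add(dst)
--     return sorted(e for e in edges if e[0] in reachable)
-- ===== Notes on version B (the rewrite author's own statement) =====
-- stated objective: simpler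
-- what changed: Replaces the adjacency-map + explicit-stack DFS with a Bellman-Ford-style relaxation: seed reachable={0} and sweep the raw edge list len(edges) times, adding dst whenever src is already reachable; no graph structure or stack is built.
import Mathlib
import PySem

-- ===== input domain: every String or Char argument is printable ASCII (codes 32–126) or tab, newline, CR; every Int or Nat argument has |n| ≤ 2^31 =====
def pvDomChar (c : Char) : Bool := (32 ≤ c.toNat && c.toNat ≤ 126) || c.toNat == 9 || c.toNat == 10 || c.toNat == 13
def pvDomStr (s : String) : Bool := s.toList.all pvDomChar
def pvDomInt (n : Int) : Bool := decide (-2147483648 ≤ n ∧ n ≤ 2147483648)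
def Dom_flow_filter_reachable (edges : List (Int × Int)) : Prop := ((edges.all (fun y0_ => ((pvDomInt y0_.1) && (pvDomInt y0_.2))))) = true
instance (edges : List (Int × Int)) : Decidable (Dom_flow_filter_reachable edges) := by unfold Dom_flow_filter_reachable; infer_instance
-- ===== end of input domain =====

-- B replaces A's adjacency-map + explicit-stack DFS by a Bellman-Ford-style relaxation
-- (|edges| full sweeps over the raw edge list) computing the same reachable set — objective: simpler.


-- ===== PORT A =====
-- graph = defaultdict(list); for src, dst in edges: graph[src].append(dst)
def pvGraph (edges : List (Int × Int)) : PySem.Dict Int (List Int) :=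
  edges.foldl (fun g e => g.insert e.1 (g.getD e.1 [] ++ [e.2])) PySem.Dict.empty

-- the while loop; the stack keeps its TOP at the HEAD (pop = head, and
-- stack.extend(graph[current]) prepends graph[current] reversed).
-- The fuel argument only makes the loop total; flow_filter_reachable passes
-- (|edges|+1)^2 and the proof shows that this always empties the stack.
def pvDfs (g : PySem.Dict Int (List Int)) : Nat → PySem.Set Int → List Int → PySem.Set Int
  | 0, reach, _ => reach
  | _ + 1, reach, [] => reach
  | fuel + 1, reach, current :: rest =>
    if current ∈ reach then pvDfs g fuel reach rest
    else pvDfs g fuel (PySem.Set.add reach current) ((g.getD current []).reverse ++ rest)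

def flow_filter_reachable (edges : List (Int × Int)) : List (Int × Int) :=
  let graph := pvGraph edges
  let reach := pvDfs graph ((edges.length + 1) * (edges.length + 1)) PySem.Set.empty [0]
  PySem.List.sorted2 (edges.filter (fun e => decide (e.1 ∈ reach))) Prod.fst Prod.snd

-- ===== PORT B =====
-- one inner sweep: for src, dst in edges: if src in reachable: reachable.add(dst)
def pvPass (edges : List (Int × Int)) (r : PySem.Set Int) : PySem.Set Int :=
  edges.foldl (fun r e => if e.1 ∈ r then PySem.Set.add r e.2 else r) r

def flow_filter_reachable_alt (edges : List (Int × Int)) : List (Int × Int) :=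
  let reach := (List.range edges.length).foldl (fun r _ => pvPass edges r) (PySem.Set.ofList [0])
  PySem.List.sorted2 (edges.filter (fun e => decide (e.1 ∈ reach))) Prod.fst Prod.snd

-- ===== PRECONDITION & SPEC =====
def Spec_flow_filter_reachable (edges : List (Int × Int)) (out : List (Int × Int)) : Prop := out = flow_filter_reachable_alt edges
instance (edges : List (Int × Int)) (out : List (Int × Int)) : Decidable (Spec_flow_filter_reachable edges out) := by unfold Spec_flow_filter_reachable; infer_instance

-- ===== CLAIM (what is proved, stated in full; the proofs are below) =====
def Claim_equal_flow_filter_reachable : Prop := ∀ (edges : List (Int × Int)), Dom_flow_filter_reachable edges → Spec_flow_filter_reachable edges (flow_filter_reachable edges)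

-- ===== LEMMAS AND PROOFS =====

-- reachability from node 0 along the edge list
inductive pvReach (edges : List (Int × Int)) : Int → Prop
  | zero : pvReach edges 0
  | step {s d : Int} : pvReach edges s → (s, d) ∈ edges → pvReach edges d

theorem subset_add (r : List Int) (x : Int) : r ⊆ PySem.Set.add r x := by
  intro y hy; rw [PySem.Set.mem_add]; exact Or.inl hy

theorem add_eq_of_mem (r : List Int) (x : Int) (h : x ∈ r) : PySem.Set.add r x = r := by
  simp [PySem.Set.add, PySem.Set.contains, h]

theorem length_add_eq_iff (r : List Int) (x : Int) :
    (PySem.Set.add r x).length = r.length ↔ PySem.Set.add r x = r := by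
  constructor
  · intro h
    by_cases hx : x ∈ r
    · exact add_eq_of_mem r x hx
    · exfalso; simp [PySem.Set.add, PySem.Set.contains, hx] at h
  · intro h; rw [h]

theorem step_subset (r : List Int) (e : Int × Int) :
    r ⊆ (if e.1 ∈ r then PySem.Set.add r e.2 else r) := by
  split
  · exact subset_add r e.2
  · exact fun _ h => h

theorem pass_fold_subset (es : List (Int × Int)) (r : List Int) :
    r ⊆ es.foldl (fun r e => if e.1 ∈ r then PySem.Set.add r e.2 else r) r := by
  induction es generalizing r with
  | nil => exact fun _ h => h
  | cons e es ih =>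
    rw [List.foldl_cons]
    exact List.Subset.trans (step_subset r e) (ih _)

theorem pass_subset (edges : List (Int × Int)) (r : List Int) : r ⊆ pvPass edges r :=
  pass_fold_subset edges r

theorem pass_fold_length_le (es : List (Int × Int)) (r : List Int) :
    r.length ≤ (es.foldl (fun r e => if e.1 ∈ r then PySem.Set.add r e.2 else r) r).length := by
  induction es generalizing r with
  | nil => exact le_refl _
  | cons e es ih =>
    rw [List.foldl_cons]
    refine le_trans ?_ (ih _)
    split
    · simp only [PySem.Set.add]; split <;> simp
    · exact le_refl _

theorem pass_fold_mem (es : List (Int × Int)) (r : List Int) (x : Int)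
    (h : x ∈ es.foldl (fun r e => if e.1 ∈ r then PySem.Set.add r e.2 else r) r) :
    x ∈ r ∨ x ∈ es.map Prod.snd := by
  induction es generalizing r with
  | nil => exact Or.inl h
  | cons e es ih =>
    rw [List.foldl_cons] at h
    rcases ih _ h with h' | h'
    · by_cases he : e.1 ∈ r
      · simp only [if_pos he, PySem.Set.mem_add] at h'
        rcases h' with h'' | h''
        · exact Or.inl h''
        · exact Or.inr (by simp [h''])
      · rw [if_neg he] at h'; exact Or.inl h'
    · exact Or.inr (by simp [h'])

theorem pass_fold_nodup (es : List (Int × Int)) (r : List Int) (h : r.Nodup) :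
    (es.foldl (fun r e => if e.1 ∈ r then PySem.Set.add r e.2 else r) r).Nodup := by
  induction es generalizing r with
  | nil => exact h
  | cons e es ih =>
    rw [List.foldl_cons]
    refine ih _ ?_
    split
    · exact PySem.Set.nodup_add r e.2 h
    · exact h

theorem pass_fold_sound (edges : List (Int × Int)) (es : List (Int × Int))
    (hsub : ∀ e ∈ es, e ∈ edges) (r : List Int) (hr : ∀ x ∈ r, pvReach edges x) :
    ∀ x ∈ es.foldl (fun r e => if e.1 ∈ r then PySem.Set.add r e.2 else r) r, pvReach edges x := by
  induction es generalizing r with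
  | nil => exact hr
  | cons e es ih =>
    rw [List.foldl_cons]
    refine ih (fun e' he' => hsub e' (List.mem_cons_of_mem _ he')) _ ?_
    intro x hx
    by_cases he : e.1 ∈ r
    · rw [if_pos he, PySem.Set.mem_add] at hx
      rcases hx with hx | hx
      · exact hr x hx
      · subst hx
        exact pvReach.step (hr e.1 he) (by simpa using hsub e (List.mem_cons_self ..))
    · rw [if_neg he] at hx; exact hr x hx

-- if a whole sweep does not grow the set, it did nothing and the set is closed
theorem pass_fold_eq_of_length (es : List (Int × Int)) (r : List Int)
    (h : (es.foldl (fun r e => if e.1 ∈ r then PySem.Set.add r e.2 else r) r).length = r.length) :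
    es.foldl (fun r e => if e.1 ∈ r then PySem.Set.add r e.2 else r) r = r := by
  induction es generalizing r with
  | nil => rfl
  | cons e es ih =>
    rw [List.foldl_cons] at h ⊢
    by_cases he : e.1 ∈ r
    · rw [if_pos he] at h ⊢
      have h1 : r.length ≤ (PySem.Set.add r e.2).length := by
        simp only [PySem.Set.add]; split <;> simp
      have h2 := pass_fold_length_le es (PySem.Set.add r e.2)
      have hstep : PySem.Set.add r e.2 = r := (length_add_eq_iff r e.2).1 (by omega)
      rw [hstep] at h ⊢
      exact ih r h
    · rw [if_neg he] at h ⊢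
      exact ih r h

theorem pass_fold_closed (es : List (Int × Int)) (r : List Int)
    (h : es.foldl (fun r e => if e.1 ∈ r then PySem.Set.add r e.2 else r) r = r) :
    ∀ e ∈ es, e.1 ∈ r → e.2 ∈ r := by
  induction es generalizing r with
  | nil => intro e he; exact absurd he (List.not_mem_nil)
  | cons e es ih =>
    rw [List.foldl_cons] at h
    have h1 : r.length ≤ (if e.1 ∈ r then PySem.Set.add r e.2 else r).length := by
      split
      · simp only [PySem.Set.add]; split <;> simp
      · exact le_refl _
    have h2 := pass_fold_length_le es (if e.1 ∈ r then PySem.Set.add r e.2 else r)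
    have h3 : (es.foldl (fun r e => if e.1 ∈ r then PySem.Set.add r e.2 else r)
        (if e.1 ∈ r then PySem.Set.add r e.2 else r)).length = r.length := by rw [h]
    have hstep : (if e.1 ∈ r then PySem.Set.add r e.2 else r) = r := by
      by_cases he : e.1 ∈ r
      · rw [if_pos he] at h1 h2 h3 ⊢
        exact (length_add_eq_iff r e.2).1 (by omega)
      · rw [if_neg he]
    rw [hstep] at h
    intro e' he' hsrc
    rcases List.mem_cons.1 he' with rfl | he''
    · by_cases hmem : e'.2 ∈ r
      · exact hmem
      · exfalso
        have : (if e'.1 ∈ r then PySem.Set.add r e'.2 else r) = r := hstep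
        rw [if_pos hsrc] at this
        simp [PySem.Set.add, PySem.Set.contains, hmem] at this
    · exact ih r h e' he'' hsrc

theorem pass_closed_of_fix (edges : List (Int × Int)) (r : List Int)
    (h : pvPass edges r = r) : ∀ e ∈ edges, e.1 ∈ r → e.2 ∈ r :=
  pass_fold_closed edges r h

theorem nodup_length_le (r bnd : List Int) (hn : r.Nodup) (hs : ∀ x ∈ r, x ∈ bnd) :
    r.length ≤ bnd.toFinset.card := by
  calc r.length = r.toFinset.card := (List.toFinset_card_of_nodup hn).symm
    _ ≤ bnd.toFinset.card := Finset.card_le_card (fun x hx => by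
        simp only [List.mem_toFinset] at hx ⊢; exact hs x hx)

theorem iter_fix (edges : List (Int × Int)) : ∀ (n : Nat) (r : List Int), r.Nodup →
    (∀ x ∈ r, x ∈ 0 :: edges.map Prod.snd) →
    (0 :: edges.map Prod.snd).toFinset.card ≤ r.length + n →
    pvPass edges ((pvPass edges)^[n] r) = (pvPass edges)^[n] r := by
  intro n
  induction n with
  | zero =>
    intro r hn hb hc
    rw [Function.iterate_zero_apply]
    refine pass_fold_eq_of_length edges r (le_antisymm ?_ (pass_fold_length_le edges r))
    refine le_trans (nodup_length_le _ _ (pass_fold_nodup edges r hn) ?_) (by omega)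
    intro x hx
    rcases pass_fold_mem edges r x hx with h' | h'
    · exact hb x h'
    · exact List.mem_cons_of_mem _ h'
  | succ n ih =>
    intro r hn hb hc
    by_cases hl : (pvPass edges r).length = r.length
    · have hfix : pvPass edges r = r := pass_fold_eq_of_length edges r hl
      rw [Function.iterate_fixed hfix, hfix]
    · have hlt : r.length + 1 ≤ (pvPass edges r).length :=
        Nat.succ_le_of_lt (lt_of_le_of_ne (pass_fold_length_le edges r) (Ne.symm hl))
      rw [Function.iterate_succ_apply]
      refine ih (pvPass edges r) (pass_fold_nodup edges r hn) ?_ (by omega)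
      intro x hx
      rcases pass_fold_mem edges r x hx with h' | h'
      · exact hb x h'
      · exact List.mem_cons_of_mem _ h'

theorem subset_iterate (edges : List (Int × Int)) (n : Nat) (r : List Int) :
    r ⊆ (pvPass edges)^[n] r := by
  induction n generalizing r with
  | zero => exact fun _ h => h
  | succ n ih =>
    rw [Function.iterate_succ_apply]
    exact List.Subset.trans (pass_subset edges r) (ih _)

theorem iterate_sound (edges : List (Int × Int)) (n : Nat) (r : List Int)
    (h : ∀ x ∈ r, pvReach edges x) : ∀ x ∈ (pvPass edges)^[n] r, pvReach edges x := by
  induction n generalizing r with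
  | zero => exact h
  | succ n ih =>
    rw [Function.iterate_succ_apply]
    exact ih _ (pass_fold_sound edges edges (fun _ h => h) r h)

theorem foldl_const_iterate (edges : List (Int × Int)) (l : List Nat) (r : List Int) :
    l.foldl (fun r _ => pvPass edges r) r = (pvPass edges)^[l.length] r := by
  induction l generalizing r with
  | nil => rfl
  | cons a l ih =>
    rw [List.foldl_cons, ih, List.length_cons, Function.iterate_succ_apply]

theorem relax_char (edges : List (Int × Int)) (x : Int) :
    x ∈ (List.range edges.length).foldl (fun r _ => pvPass edges r) (PySem.Set.ofList [0])
      ↔ pvReach edges x := by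
  have h0 : (PySem.Set.ofList [0] : List Int) = [0] := rfl
  rw [foldl_const_iterate, List.length_range, h0]
  have hb : ∀ y ∈ ([0] : List Int), y ∈ 0 :: edges.map Prod.snd := by
    intro y hy; simp at hy; simp [hy]
  have hfix : pvPass edges ((pvPass edges)^[edges.length] [0]) = (pvPass edges)^[edges.length] [0] := by
    refine iter_fix edges edges.length [0] (by simp) hb ?_
    calc (0 :: edges.map Prod.snd).toFinset.card ≤ (0 :: edges.map Prod.snd).length :=
          List.toFinset_card_le _
      _ = [0].length + edges.length := by simp [Nat.add_comm]
  constructor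
  · exact iterate_sound edges edges.length [0] (by intro y hy; simp at hy; subst hy; exact pvReach.zero) x
  · intro hr
    induction hr with
    | zero => exact subset_iterate edges edges.length [0] (by simp)
    | step hs he ih => exact pass_closed_of_fix edges _ hfix _ he ih

theorem pvGraph_getD_aux (es : List (Int × Int)) (g : PySem.Dict Int (List Int)) (c : Int) :
    (es.foldl (fun g e => g.insert e.1 (g.getD e.1 [] ++ [e.2])) g).getD c []
      = g.getD c [] ++ (es.filter (fun e => e.1 == c)).map Prod.snd := by
  induction es generalizing g with
  | nil => simp
  | cons e es ih =>
    simp only [List.foldl_cons, ih, List.filter_cons]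
    rw [PySem.Dict.getD_insert]
    by_cases h : c = e.1
    · simp [h]
    · simp [h, Ne.symm h]

theorem pvGraph_getD (edges : List (Int × Int)) (c : Int) :
    (pvGraph edges).getD c [] = (edges.filter (fun e => e.1 == c)).map Prod.snd := by
  rw [pvGraph, pvGraph_getD_aux]
  rfl

theorem pvGraph_mem (edges : List (Int × Int)) (c d : Int) :
    d ∈ (pvGraph edges).getD c [] ↔ (c, d) ∈ edges := by
  rw [pvGraph_getD]
  simp only [List.mem_map, List.mem_filter]
  constructor
  · rintro ⟨e, ⟨he, hc⟩, hd⟩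
    simp only [beq_iff_eq] at hc
    have : e = (c, d) := by
      cases e; simp_all
    rwa [this] at he
  · intro h
    exact ⟨(c, d), ⟨h, by simp⟩, rfl⟩

theorem pvGraph_len (edges : List (Int × Int)) (c : Int) :
    ((pvGraph edges).getD c []).length ≤ edges.length := by
  rw [pvGraph_getD]
  simpa using List.length_filter_le _ _

theorem pvGraph_empty (edges : List (Int × Int)) (c : Int) (h : c ∉ edges.map Prod.fst) :
    (pvGraph edges).getD c [] = [] := by
  rw [pvGraph_getD]
  have : edges.filter (fun e => e.1 == c) = [] := by
    rw [List.filter_eq_nil_iff]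
    intro e he hc
    simp only [beq_iff_eq] at hc
    exact h (by exact List.mem_map.2 ⟨e, he, hc⟩)
  simp [this]

def pvM (edges : List (Int × Int)) (reach stack : List Int) : Nat :=
  (edges.length + 1) * (((edges.map Prod.fst).toFinset) \ reach.toFinset).card + stack.length

theorem card_sdiff_mono (S : Finset Int) (reach : List Int) (c : Int) :
    (S \ (reach ++ [c]).toFinset).card ≤ (S \ reach.toFinset).card := by
  refine Finset.card_le_card (Finset.sdiff_subset_sdiff Finset.Subset.rfl ?_)
  intro x hx
  simp only [List.mem_toFinset] at hx ⊢
  exact List.mem_append_left _ hx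

theorem card_sdiff_strict (S : Finset Int) (reach : List Int) (c : Int)
    (hcS : c ∈ S) (hcr : c ∉ reach) :
    (S \ (reach ++ [c]).toFinset).card + 1 = (S \ reach.toFinset).card := by
  have h1 : (reach ++ [c]).toFinset = insert c reach.toFinset := by
    simp [List.toFinset_append]
  rw [h1, Finset.sdiff_insert]
  have hcmem : c ∈ S \ reach.toFinset := by
    simp [Finset.mem_sdiff, hcS, hcr]
  rw [Finset.card_erase_of_mem hcmem]
  have : 1 ≤ (S \ reach.toFinset).card := Finset.card_pos.2 ⟨c, hcmem⟩
  omega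

theorem add_not_mem (reach : List Int) (c : Int) (h : c ∉ reach) :
    PySem.Set.add reach c = reach ++ [c] := by
  simp [PySem.Set.add, PySem.Set.contains, h]

theorem dfs_main (edges : List (Int × Int)) : ∀ (fuel : Nat) (reach stack : List Int),
    pvM edges reach stack ≤ fuel → reach.Nodup →
    (∀ x ∈ reach, pvReach edges x) → (∀ x ∈ stack, pvReach edges x) →
    (∀ s ∈ reach, ∀ d, (s, d) ∈ edges → d ∈ reach ∨ d ∈ stack) →
    (∀ x ∈ reach, x ∈ pvDfs (pvGraph edges) fuel reach stack) ∧
    (∀ x ∈ stack, x ∈ pvDfs (pvGraph edges) fuel reach stack) ∧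
    (∀ x ∈ pvDfs (pvGraph edges) fuel reach stack, pvReach edges x) ∧
    (∀ s ∈ pvDfs (pvGraph edges) fuel reach stack, ∀ d, (s, d) ∈ edges →
        d ∈ pvDfs (pvGraph edges) fuel reach stack) := by
  intro fuel
  induction fuel with
  | zero =>
    intro reach stack hm _ hr _ hi
    have hs : stack = [] := by
      unfold pvM at hm
      exact List.eq_nil_of_length_eq_zero (by omega)
    subst hs
    refine ⟨fun x h => h, by simp, hr, ?_⟩
    intro s hs d hd
    rcases hi s hs d hd with h | h
    · exact h
    · simp at h
  | succ fuel ih =>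
    intro reach stack hm hn hr hst hi
    match stack with
    | [] =>
      refine ⟨fun x h => h, by simp, hr, ?_⟩
      intro s hs d hd
      rcases hi s hs d hd with h | h
      · exact h
      · simp at h
    | c :: rest =>
      by_cases hc : c ∈ reach
      · simp only [pvDfs, if_pos hc]
        have hm' : pvM edges reach rest ≤ fuel := by
          unfold pvM at hm ⊢; simp at hm; omega
        have hi' : ∀ s ∈ reach, ∀ d, (s, d) ∈ edges → d ∈ reach ∨ d ∈ rest := by
          intro s hs d hd
          rcases hi s hs d hd with h | h
          · exact Or.inl h
          · rcases List.mem_cons.1 h with rfl | h'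
            · exact Or.inl hc
            · exact Or.inr h'
        obtain ⟨ha, hb, hsnd, hcl⟩ := ih reach rest hm' hn hr
          (fun x hx => hst x (List.mem_cons_of_mem _ hx)) hi'
        refine ⟨ha, ?_, hsnd, hcl⟩
        intro x hx
        rcases List.mem_cons.1 hx with rfl | hx'
        · exact ha x hc
        · exact hb x hx'
      · simp only [pvDfs, if_neg hc]
        set g := pvGraph edges with hg
        have hadd : PySem.Set.add reach c = reach ++ [c] := add_not_mem reach c hc
        have hreach_c : pvReach edges c := hst c (List.mem_cons_self ..)
        -- measure
        have hm' : pvM edges (PySem.Set.add reach c) ((g.getD c []).reverse ++ rest) ≤ fuel := by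
          rw [hadd]
          unfold pvM at hm ⊢
          simp only [List.length_append, List.length_reverse, List.length_cons] at hm ⊢
          by_cases hcs : c ∈ (edges.map Prod.fst).toFinset
          · have hk := card_sdiff_strict (edges.map Prod.fst).toFinset reach c hcs hc
            have hlen : (g.getD c []).length ≤ edges.length := pvGraph_len edges c
            set k' := ((edges.map Prod.fst).toFinset \ (reach ++ [c]).toFinset).card
            have : (edges.length + 1) * (k' + 1) = (edges.length + 1) * k' + (edges.length + 1) :=
              by ring
            rw [← hk] at hm
            omega
          · have hempty : g.getD c [] = [] := by
              rw [hg]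
              refine pvGraph_empty edges c ?_
              intro hmem
              exact hcs (List.mem_toFinset.2 hmem)
            have hk := card_sdiff_mono (edges.map Prod.fst).toFinset reach c
            rw [hempty]
            simp only [List.length_nil]
            have hmul : (edges.length + 1) * ((edges.map Prod.fst).toFinset \ (reach ++ [c]).toFinset).card
                ≤ (edges.length + 1) * ((edges.map Prod.fst).toFinset \ reach.toFinset).card :=
              Nat.mul_le_mul_left _ hk
            omega
        have hn' : (PySem.Set.add reach c).Nodup := PySem.Set.nodup_add reach c hn
        have hr' : ∀ x ∈ PySem.Set.add reach c, pvReach edges x := by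
          intro x hx
          rcases (PySem.Set.mem_add reach c x).1 hx with h | rfl
          · exact hr x h
          · exact hreach_c
        have hst' : ∀ x ∈ (g.getD c []).reverse ++ rest, pvReach edges x := by
          intro x hx
          rcases List.mem_append.1 hx with h | h
          · rw [List.mem_reverse] at h
            exact pvReach.step hreach_c ((pvGraph_mem edges c x).1 h)
          · exact hst x (List.mem_cons_of_mem _ h)
        have hi' : ∀ s ∈ PySem.Set.add reach c, ∀ d, (s, d) ∈ edges →
            d ∈ PySem.Set.add reach c ∨ d ∈ (g.getD c []).reverse ++ rest := by
          intro s hs d hd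
          rcases (PySem.Set.mem_add reach c s).1 hs with h | rfl
          · rcases hi s h d hd with h' | h'
            · exact Or.inl ((subset_add reach c) h')
            · rcases List.mem_cons.1 h' with rfl | h''
              · exact Or.inl ((PySem.Set.mem_add _ _ _).2 (Or.inr rfl))
              · exact Or.inr (List.mem_append_right _ h'')
          · refine Or.inr (List.mem_append_left _ ?_)
            rw [List.mem_reverse]
            exact (pvGraph_mem edges s d).2 hd
        obtain ⟨ha, hb, hsnd, hcl⟩ := ih (PySem.Set.add reach c) ((g.getD c []).reverse ++ rest)
          hm' hn' hr' hst' hi'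
        refine ⟨?_, ?_, hsnd, hcl⟩
        · intro x hx
          exact ha x ((subset_add reach c) hx)
        · intro x hx
          rcases List.mem_cons.1 hx with rfl | hx'
          · exact ha x ((PySem.Set.mem_add _ _ _).2 (Or.inr rfl))
          · exact hb x (List.mem_append_right _ hx')

theorem dfs_char (edges : List (Int × Int)) (x : Int) :
    x ∈ pvDfs (pvGraph edges) ((edges.length + 1) * (edges.length + 1)) PySem.Set.empty [0]
      ↔ pvReach edges x := by
  have hm : pvM edges PySem.Set.empty [0] ≤ (edges.length + 1) * (edges.length + 1) := by
    unfold pvM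
    have h1 : ((edges.map Prod.fst).toFinset \ (PySem.Set.empty : List Int).toFinset).card
        ≤ edges.length := by
      calc ((edges.map Prod.fst).toFinset \ (PySem.Set.empty : List Int).toFinset).card
          ≤ (edges.map Prod.fst).toFinset.card := Finset.card_le_card (Finset.sdiff_subset)
        _ ≤ (edges.map Prod.fst).length := List.toFinset_card_le _
        _ = edges.length := List.length_map ..
    have h2 : (edges.length + 1) * ((edges.map Prod.fst).toFinset \ (PySem.Set.empty : List Int).toFinset).card
        ≤ (edges.length + 1) * edges.length := Nat.mul_le_mul_left _ h1
    have h3 : (edges.length + 1) * (edges.length + 1) = (edges.length + 1) * edges.length + (edges.length + 1) := by ring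
    simp only [List.length_cons, List.length_nil]
    omega
  obtain ⟨_, hb, hsnd, hcl⟩ := dfs_main edges ((edges.length + 1) * (edges.length + 1))
    PySem.Set.empty [0] hm (by simp [PySem.Set.empty]) (by simp [PySem.Set.empty])
    (by intro y hy; simp at hy; subst hy; exact pvReach.zero)
    (by intro s hs; simp [PySem.Set.empty] at hs)
  constructor
  · exact hsnd x
  · intro hr
    induction hr with
    | zero => exact hb 0 (by simp)
    | step hs he ih => exact hcl _ ih _ he

-- ===== VERDICT (by name: the statement is the Claim_ definition above) =====
theorem flow_filter_reachable_spec : Claim_equal_flow_filter_reachable := by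
  intro edges _
  unfold Spec_flow_filter_reachable flow_filter_reachable flow_filter_reachable_alt
  have h : ∀ e ∈ edges,
      (decide (e.1 ∈ pvDfs (pvGraph edges) ((edges.length + 1) * (edges.length + 1)) PySem.Set.empty [0]))
        = (decide (e.1 ∈ (List.range edges.length).foldl (fun r _ => pvPass edges r) (PySem.Set.ofList [0]))) := by
    intro e _
    simp only [decide_eq_decide, dfs_char, relax_char]
  simp only []
  rw [List.filter_congr h]
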